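-- pv_equiv track=rewrite | github.com/KhonsuT/rag | rag/rag.py | _questions_generation
-- ===== SOURCE A (Python) =====
-- def _questions_generation(questions: str):
--     l_index = 0
--     questions_list = []
--     for i, val in enumerate(questions):
--         if val == "?":
--             questions_list.append(questions[l_index : i + 1])
--             l_index = i + 1
--     return questions_list
-- ===== SOURCE B (Python) =====
-- def _questions_generation(questions: str):
--     head, sep, tail = questions.partition("?")
--     if not sep:
--         return []
--     return [head + "?"] + _questions_generation(tail)
-- ===== Notes on version B (the rewrite author's own statement) =====
-- stated objective: simpler
-- what changed: A's indexed character scan with l_index bookkeeping and slicing is replaced by a recursion that uses str.partition to cut off the text up to the first '?' and recurses on the remainder.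
import Mathlib
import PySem

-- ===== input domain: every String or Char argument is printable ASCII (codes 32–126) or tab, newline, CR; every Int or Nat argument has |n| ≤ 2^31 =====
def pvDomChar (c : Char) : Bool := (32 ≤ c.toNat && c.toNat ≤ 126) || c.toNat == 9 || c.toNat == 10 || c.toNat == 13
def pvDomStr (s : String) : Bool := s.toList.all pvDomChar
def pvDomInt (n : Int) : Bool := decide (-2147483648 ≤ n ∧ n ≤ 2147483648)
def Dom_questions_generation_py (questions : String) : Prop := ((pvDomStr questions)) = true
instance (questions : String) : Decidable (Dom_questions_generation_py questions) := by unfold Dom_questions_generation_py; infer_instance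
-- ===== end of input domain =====

-- B replaces A's indexed scan-and-slice loop by a recursion that partitions off the
-- text up to the first '?' and recurses on the tail (objective: simpler).

-- ===== PORT A =====
-- literal port of A: enumerate the characters, keep (l_index, questions_list),
-- on '?' append the slice questions[l_index : i + 1] and move l_index past it
def questions_generation_py (questions : String) : List String :=
  ((PySem.List.enumerate questions.toList 0).foldl
    (fun (st : Int × List String) (p : Int × Char) =>
      if p.2 = '?' then
        (p.1 + 1, st.2 ++ [PySem.Str.slice questions (some st.1) (some (p.1 + 1))])
      else st)
    (0, [])).2

-- ===== PORT B =====
-- hand port of questions.partition("?") for the single char '?': head is the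
-- '?'-free prefix (takeWhile), the rest (dropWhile) starts with '?' iff sep ≠ ""
-- (exact: partition splits at the first occurrence of the separator)
def pvAltGo (cs : List Char) : List String :=
  match _h : cs.dropWhile (· ≠ '?') with
  | [] => []                                   -- sep == "" : no '?' left
  | _ :: tail => String.ofList (cs.takeWhile (· ≠ '?') ++ ['?']) :: pvAltGo tail
termination_by cs.length
decreasing_by
  have hle := List.length_dropWhile_le (fun c => decide (c ≠ '?')) cs
  rw [_h] at hle
  simp at hle
  omega

def questions_generation_py_alt (questions : String) : List String :=
  pvAltGo questions.toList

-- ===== PRECONDITION & SPEC =====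
def Spec_questions_generation_py (questions : String) (out : List String) : Prop := out = questions_generation_py_alt questions
instance (questions : String) (out : List String) : Decidable (Spec_questions_generation_py questions out) := by unfold Spec_questions_generation_py; infer_instance

-- ===== CLAIM (what is proved, stated in full; the proofs are below) =====
def Claim_equal_questions_generation_py : Prop := ∀ (questions : String), Dom_questions_generation_py questions → Spec_questions_generation_py questions (questions_generation_py questions)

-- ===== LEMMAS AND PROOFS =====

lemma pvAltGo_no_q (mid : List Char) (h : '?' ∉ mid) : pvAltGo mid = [] := by
  have hnil : mid.dropWhile (· ≠ '?') = [] := by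
    rw [List.dropWhile_eq_nil_iff]
    intro x hx; simp; rintro rfl; exact h hx
  rw [pvAltGo]
  split
  · rfl
  · rename_i c tail heq
    rw [show (fun x => decide ¬x = '?') = (fun x : Char => decide (x ≠ '?')) from rfl, hnil] at heq
    cases heq

lemma pvAltGo_q (mid rest : List Char) (h : '?' ∉ mid) :
    pvAltGo (mid ++ '?' :: rest)
      = String.ofList (mid ++ ['?']) :: pvAltGo rest := by
  have hmid : ∀ x ∈ mid, (x ≠ '?' : Bool) := by
    intro x hx; simp; rintro rfl; exact h hx
  have hdrop : (mid ++ '?' :: rest).dropWhile (· ≠ '?') = '?' :: rest := by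
    rw [List.dropWhile_append_of_pos hmid]; simp
  have htake : (mid ++ '?' :: rest).takeWhile (· ≠ '?') = mid := by
    rw [List.takeWhile_append_of_pos hmid]; simp
  rw [pvAltGo, hdrop, htake]

lemma pvLoop (s : String) (suffix : List Char) :
    ∀ (mid : List Char) (l : Nat) (acc : List String),
      '?' ∉ mid →
      s.toList.drop l = mid ++ suffix →
      ((PySem.List.enumerate suffix ((l : Int) + (mid.length : Int))).foldl
        (fun (st : Int × List String) (p : Int × Char) =>
          if p.2 = '?' then
            (p.1 + 1, st.2 ++ [PySem.Str.slice s (some st.1) (some (p.1 + 1))])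
          else st)
        ((l : Int), acc)).2
      = acc ++ pvAltGo (mid ++ suffix) := by
  induction suffix with
  | nil =>
    intro mid l acc hmid _
    simp [PySem.List.enumerate, pvAltGo_no_q mid hmid]
  | cons c rest ih =>
    intro mid l acc hmid hdrop
    rw [PySem.List.enumerate_cons]
    by_cases hc : c = '?'
    · subst hc
      have hslice : PySem.Str.slice s (some (l : Int)) (some ((l : Int) + (mid.length : Int) + 1))
          = String.ofList (mid ++ ['?']) := by
        have hcast : ((l : Int) + (mid.length : Int) + 1) = ((l + mid.length + 1 : Nat) : Int) := by
          push_cast; ring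
        have htl : (PySem.Str.slice s (some (l : Int)) (some ((l : Int) + (mid.length : Int) + 1))).toList
            = mid ++ ['?'] := by
          rw [PySem.Str.toList_slice, PySem.Chars.slice_eq_listSlice, hcast,
            PySem.List.slice_natCast, hdrop]
          have : l + mid.length + 1 - l = mid.length + 1 := by omega
          rw [this]
          rw [show mid ++ '?' :: rest = (mid ++ ['?']) ++ rest by simp]
          rw [List.take_append_of_le_length (by simp)]
          simp
        rw [← String.ofList_toList (s := PySem.Str.slice s _ _), htl]
      simp only [List.foldl_cons]
      rw [if_pos trivial]
      have hdrop' : s.toList.drop (l + mid.length + 1) = rest := by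
        have hdd : s.toList.drop (l + mid.length + 1) = (s.toList.drop l).drop (mid.length + 1) := by
          rw [List.drop_drop]
          congr 1
        rw [hdd, hdrop, show mid ++ '?' :: rest = (mid ++ ['?']) ++ rest by simp]
        have h1 : (mid ++ ['?']).length = mid.length + 1 := by simp
        rw [← h1, List.drop_left]
      have := ih [] (l + mid.length + 1) (acc ++ [String.ofList (mid ++ ['?'])])
        (by simp) (by simpa using hdrop')
      simp only [List.length_nil, Nat.cast_zero, add_zero, List.nil_append] at this
      have hcast : ((l : Int) + (mid.length : Int) + 1) = ((l + mid.length + 1 : Nat) : Int) := by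
        push_cast; ring
      rw [hslice, hcast, this, pvAltGo_q mid rest hmid]
      simp
    · simp only [List.foldl_cons, if_neg hc]
      have := ih (mid ++ [c]) l acc
        (by simp [hmid]; exact fun h => hc h.symm)
        (by rw [hdrop]; simp)
      simp only [List.length_append, List.length_singleton] at this
      rw [show (l : Int) + (mid.length : Int) + 1 = (l : Int) + ((mid.length + 1 : Nat) : Int) by push_cast; ring]
      rw [this]
      simp

-- ===== VERDICT (by name: the statement is the Claim_ definition above) =====
theorem questions_generation_py_spec : Claim_equal_questions_generation_py := by
  intro questions _
  unfold Spec_questions_generation_py questions_generation_py questions_generation_py_alt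
  have := pvLoop questions questions.toList [] 0 [] (by simp) (by simp)
  simpa using this
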